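-- pv_equiv track=rewrite | github.com/qpwisu/algorithm | 프로그래머스/3/388354. 홀짝트리/홀짝트리.py | solution
-- ===== SOURCE A (Python) =====
-- import collections
-- from collections import defaultdict
--
-- def solution(nodes, edges):
--     answer = [0, 0]
--     graph = defaultdict(list)
--     visited = [False] * (1000000 + 1)
--
--     def bfs(start):
--         q = collections.deque([start])
--         visited[start] = True
--         is_holjjak = True
--         holjjak_root_chance = 1
--
--         is_reverse_holjjak = True
--         reverse_holjjak_root_chance = 1
--
--         while q:
--             node = q.popleft()
--             children_cnt_if_root = len(graph[node])
--             children_cnt_if_not_root = len(graph[node]) - 1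
--
--             if (node + children_cnt_if_not_root) % 2 == 1:  # 노드와 노드 자식을 더한게 홀수면 홀짝노드가 아님
--                 if holjjak_root_chance:
--                     holjjak_root_chance -= 1
--                     if (node + children_cnt_if_root) % 2 == 1:
--                         is_holjjak = False
--                 else:
--                     is_holjjak = False
--
--             if (node + children_cnt_if_not_root) % 2 == 0:  # 노드와 노드 자식을 더한게 짝수면 역홀짝노드가 아님
--                 if reverse_holjjak_root_chance:
--                     reverse_holjjak_root_chance -= 1
--                     if (node + children_cnt_if_root) % 2 == 0:
--                         is_reverse_holjjak = False
--                 else: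
--                     is_reverse_holjjak = False
--
--             for next_node in graph[node]:
--                 if not visited[next_node]:
--                     visited[next_node] = True
--                     q.append(next_node)
--
--         if is_holjjak:
--             if holjjak_root_chance:  # 루트가 없다면 그건 홀짝이 아닌거죠
--                 is_holjjak = False
--         if is_reverse_holjjak:
--             if reverse_holjjak_root_chance:
--                 is_reverse_holjjak = False
--
--         return is_holjjak, is_reverse_holjjak
--
--     for a, b in edges:
--         graph[a].append(b)
--         graph[b].append(a)
--
--     for node in nodes:
--         if not visited[node]:
--             is_holjjak, is_reverse_holjjak = bfs(node)
--             if is_holjjak: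
--                 answer[0] += 1
--             if is_reverse_holjjak:
--                 answer[1] += 1
--
--     return answer
-- ===== SOURCE B (Python) =====
-- def solution(nodes, edges):
--     # Same answer as A, computed with a degree/adjacency dict, an explicit-stack DFS
--     # per component and a parity count ("exactly one node with node+degree even/odd")
--     # instead of A's fixed-size visited array, BFS deque and root-chance flag machine.
--     deg = {}
--     adj = {}
--     for a, b in edges:
--         deg[a] = deg.get(a, 0) + 1
--         deg[b] = deg.get(b, 0) + 1
--         adj.setdefault(a, []).append(b)
--         adj.setdefault(b, []).append(a)
--     answer = [0, 0]
--     seen = set()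
--     for n in nodes:
--         if n in seen:
--             continue
--         comp = {n}
--         stack = [n]
--         while stack:
--             x = stack.pop()
--             for y in adj.get(x, ()):
--                 if y not in comp:
--                     comp.add(y)
--                     stack.append(y)
--         seen |= comp
--         even = sum(1 for x in comp if (x + deg.get(x, 0)) % 2 == 0)
--         if even == 1:
--             answer[0] += 1
--         if len(comp) - even == 1:
--             answer[1] += 1
--     return answer
-- ===== Notes on version B (the rewrite author's own statement) =====
-- stated objective: simpler
-- what changed: A's per-component BFS with a deque, a 10^6-slot shared visited array and a stateful 'root chance' flag machine is replaced by a degree counter plus an explicit-stack DFS over a hash-set component and a plain parity tally (a component counts as holjjak iff exactly one member has node+degree even, reverse-holjjak iff exactly one has it odd).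
-- outside the precondition, e.g. on solution([0, -1000001], []): A returns [1, 0], B returns [1, 1]; on solution([0], [(2000000, 2000000)]): A returns [1, 0], B returns [1, 0]
import Mathlib
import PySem

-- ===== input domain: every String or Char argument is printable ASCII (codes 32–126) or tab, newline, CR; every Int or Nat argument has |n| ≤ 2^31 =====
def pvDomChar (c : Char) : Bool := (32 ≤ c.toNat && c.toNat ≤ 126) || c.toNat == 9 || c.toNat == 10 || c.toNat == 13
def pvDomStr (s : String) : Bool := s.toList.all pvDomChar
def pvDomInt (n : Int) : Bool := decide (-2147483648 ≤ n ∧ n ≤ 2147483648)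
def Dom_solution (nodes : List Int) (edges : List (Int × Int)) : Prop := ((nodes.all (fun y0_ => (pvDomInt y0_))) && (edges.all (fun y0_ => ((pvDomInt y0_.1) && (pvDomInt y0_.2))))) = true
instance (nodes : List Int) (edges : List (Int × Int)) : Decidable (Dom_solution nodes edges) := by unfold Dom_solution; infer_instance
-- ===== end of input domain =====

-- B replaces A's fixed-size visited array + BFS deque + root-chance flag machine by a
-- degree dict, an explicit-stack DFS per component and a parity tally; same return value.


-- ===== PORT A =====
-- graph = defaultdict(list); for a, b in edges: graph[a].append(b); graph[b].append(a)
def pvGraphA (edges : List (Int × Int)) : PySem.Dict Int (List Int) :=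
  edges.foldl (fun g e =>
    let g1 := g.insert e.1 (g.getD e.1 [] ++ [e.2])
    g1.insert e.2 (g1.getD e.2 [] ++ [e.1])) PySem.Dict.empty

-- termination helper for the while-loop of bfs: marking an unvisited slot lowers the
-- number of `false` entries of the visited list by one
theorem pvMark_measure (xs : List Bool) (i : Int)
    (h : PySem.List.pyGet? xs i = some false) :
    (PySem.List.pySetD xs i true).count false + 1 = xs.count false := by
  unfold PySem.List.pyGet? at h
  unfold PySem.List.pySetD PySem.List.pySet?
  cases hk : PySem.List.pyIdx? xs.length i with
  | none => simp [hk] at h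
  | some k =>
    simp only [hk, Option.bind_some] at h
    have hlt : k < xs.length := by
      by_contra hge
      rw [List.getElem?_eq_none (by omega)] at h; cases h
    simp only [Option.map_some, Option.getD_some]
    have hx : xs[k] = false := by
      rw [List.getElem?_eq_getElem hlt] at h; exact Option.some.inj h
    have hmemf : false ∈ xs := by rw [← hx]; exact List.getElem_mem hlt
    have hpos : 0 < xs.count false := List.count_pos_iff.mpr hmemf
    rw [List.count_set hlt]
    simp [hx]
    omega

-- while q: node = q.popleft(); …flag updates…; for next_node in graph[node]: mark+append
-- (out-of-range indices, on which Python raises IndexError, are skipped here;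
--  Pre_solution keeps every touched value in range, where this is exact)
def pvBfsLoop (graph : PySem.Dict Int (List Int)) (q : List Int) (visited : List Bool)
    (isH : Bool) (hC : Int) (isR : Bool) (rC : Int) :
    List Bool × Bool × Int × Bool × Int :=
  match q with
  | [] => (visited, isH, hC, isR, rC)
  | node :: qRest =>
    let adj := graph.getD node []
    let cr : Int := adj.length
    let cnr : Int := cr - 1
    let s1 : Bool × Int :=
      if PySem.Int.mod (node + cnr) 2 = 1 then
        if hC ≠ 0 then
          (if PySem.Int.mod (node + cr) 2 = 1 then false else isH, hC - 1)
        else (false, hC)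
      else (isH, hC)
    let s2 : Bool × Int :=
      if PySem.Int.mod (node + cnr) 2 = 0 then
        if rC ≠ 0 then
          (if PySem.Int.mod (node + cr) 2 = 0 then false else isR, rC - 1)
        else (false, rC)
      else (isR, rC)
    let vq := adj.foldl (fun (vq : List Bool × List Int) nxt =>
        if PySem.List.pyGet? vq.1 nxt = some false then
          (PySem.List.pySetD vq.1 nxt true, vq.2 ++ [nxt])
        else vq) (visited, qRest)
    pvBfsLoop graph vq.2 vq.1 s1.1 s1.2 s2.1 s2.2
termination_by 2 * visited.count false + q.length
decreasing_by
  have key : ∀ (l : List Int) (v : List Bool) (qq : List Int),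
      2 * (l.foldl (fun (vq : List Bool × List Int) nxt =>
        if _h : PySem.List.pyGet? vq.1 nxt = some false then
          (PySem.List.pySetD vq.1 nxt true, vq.2 ++ [nxt])
        else vq) (v, qq)).1.count false +
      (l.foldl (fun (vq : List Bool × List Int) nxt =>
        if _h : PySem.List.pyGet? vq.1 nxt = some false then
          (PySem.List.pySetD vq.1 nxt true, vq.2 ++ [nxt])
        else vq) (v, qq)).2.length ≤ 2 * v.count false + qq.length := by
    intro l
    induction l with
    | nil => intro v qq; simp
    | cons y t ih =>
      intro v qq
      simp only [List.foldl_cons]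
      by_cases hy : PySem.List.pyGet? v y = some false
      · rw [dif_pos hy]
        have := ih (PySem.List.pySetD v y true) (qq ++ [y])
        have hm := pvMark_measure v y hy
        simp only [List.length_append, List.length_cons, List.length_nil] at this ⊢
        omega
      · rw [dif_neg hy]
        exact ih v qq
  have := key (graph.getD node []) visited qRest
  simp only [List.length_cons]
  omega

-- one iteration of the 'for node in nodes' loop: visited-check, bfs, flag post-check, count
def pvStepA (graph : PySem.Dict Int (List Int)) (st : Int × Int × List Bool) (n : Int) :
    Int × Int × List Bool :=
  if PySem.List.pyGet? st.2.2 n = some false then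
    let r := pvBfsLoop graph [n] (PySem.List.pySetD st.2.2 n true) true 1 true 1
    let isH := if r.2.1 && decide (r.2.2.1 ≠ 0) then false else r.2.1
    let isR := if r.2.2.2.1 && decide (r.2.2.2.2 ≠ 0) then false else r.2.2.2.1
    (st.1 + (if isH then 1 else 0), st.2.1 + (if isR then 1 else 0), r.1)
  else st

def solution (nodes : List Int) (edges : List (Int × Int)) : List Int :=
  let graph := pvGraphA edges
  let res := nodes.foldl (pvStepA graph) (0, 0, List.replicate 1000001 false)
  [res.1, res.2.1]

-- ===== PORT B =====
-- for a, b in edges: deg[a]+=1; deg[b]+=1; adj.setdefault(a,[]).append(b); adj.setdefault(b,[]).append(a)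
def pvDegAdj (edges : List (Int × Int)) : PySem.Dict Int Int × PySem.Dict Int (List Int) :=
  edges.foldl (fun p e =>
    let d1 := p.1.insert e.1 (p.1.getD e.1 0 + 1)
    let d2 := d1.insert e.2 (d1.getD e.2 0 + 1)
    let a1 := p.2.insert e.1 (p.2.getD e.1 [] ++ [e.2])
    let a2 := a1.insert e.2 (a1.getD e.2 [] ++ [e.1])
    (d2, a2)) (PySem.Dict.empty, PySem.Dict.empty)

-- termination helper for the dfs stack loop: pushed values come from adj's value lists
theorem pvAdjVal_mem (adj : PySem.Dict Int (List Int)) (x y : Int)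
    (h : y ∈ adj.getD x []) : y ∈ adj.values.flatten := by
  rw [PySem.Dict.getD_eq_get?_getD] at h
  cases hg : adj.get? x with
  | none => rw [hg] at h; simp at h
  | some v =>
    rw [hg] at h; simp only [Option.getD_some] at h
    have hv : v ∈ adj.values := by
      have := PySem.Dict.mem_items_of_get?_eq_some (d := adj) hg
      unfold PySem.Dict.values
      exact List.mem_map_of_mem this
    exact List.mem_flatten.mpr ⟨v, hv, h⟩

-- while stack: x = stack.pop(); for y in adj.get(x, ()): if y not in comp: comp.add(y); stack.append(y)
def pvDfsLoop (adj : PySem.Dict Int (List Int)) (stack : List Int) (comp : PySem.Set Int) :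
    PySem.Set Int :=
  if hs : stack = [] then comp
  else
    let x := stack.getLast hs
    let rest := stack.dropLast
    let cs := (adj.getD x []).foldl (fun (p : PySem.Set Int × List Int) y =>
        if PySem.Set.contains p.1 y then p else (PySem.Set.add p.1 y, p.2 ++ [y])) (comp, rest)
    pvDfsLoop adj cs.2 cs.1
termination_by 2 * ((adj.values.flatten.toFinset) \ comp.toFinset).card + stack.length
decreasing_by
  have key : ∀ (l : List Int) (c : PySem.Set Int) (st : List Int), (∀ y ∈ l, y ∈ adj.values.flatten) →
      2 * ((adj.values.flatten.toFinset) \ (l.foldl (fun (p : PySem.Set Int × List Int) y =>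
        if _h : PySem.Set.contains p.1 y then p else (PySem.Set.add p.1 y, p.2 ++ [y])) (c, st)).1.toFinset).card +
      (l.foldl (fun (p : PySem.Set Int × List Int) y =>
        if _h : PySem.Set.contains p.1 y then p else (PySem.Set.add p.1 y, p.2 ++ [y])) (c, st)).2.length ≤
      2 * ((adj.values.flatten.toFinset) \ c.toFinset).card + st.length := by
    intro l
    induction l with
    | nil => intro c st _; simp
    | cons y t ih =>
      intro c st hmem
      simp only [List.foldl_cons]
      by_cases hy : PySem.Set.contains c y = true
      · rw [dif_pos hy]
        exact ih c st (fun z hz => hmem z (List.mem_cons_of_mem _ hz))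
      · rw [dif_neg hy]
        have hynotc : y ∉ c := by simpa using hy
        have hadd : (PySem.Set.add c y).toFinset = insert y c.toFinset := by
          rw [PySem.Set.add_of_not_mem hynotc]; ext z; simp [or_comm]
        have hcard : ((adj.values.flatten.toFinset) \ (PySem.Set.add c y).toFinset).card + 1 =
            ((adj.values.flatten.toFinset) \ c.toFinset).card := by
          rw [hadd, Finset.sdiff_insert]
          rw [Finset.card_erase_of_mem]
          · have : y ∈ adj.values.flatten.toFinset \ c.toFinset := by
              simp only [Finset.mem_sdiff, List.mem_toFinset]
              exact ⟨hmem y (List.mem_cons_self), hynotc⟩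
            have hpos : 0 < ((adj.values.flatten.toFinset) \ c.toFinset).card :=
              Finset.card_pos.mpr ⟨y, this⟩
            omega
          · simp only [Finset.mem_sdiff, List.mem_toFinset]
            exact ⟨hmem y (List.mem_cons_self), hynotc⟩
        have := ih (PySem.Set.add c y) (st ++ [y]) (fun z hz => hmem z (List.mem_cons_of_mem _ hz))
        simp only [List.length_append, List.length_cons, List.length_nil] at this ⊢
        omega
  have hsub : ∀ y ∈ adj.getD (stack.getLast hs) [], y ∈ adj.values.flatten :=
    fun y hy => pvAdjVal_mem adj _ y hy
  have := key (adj.getD (stack.getLast hs) []) comp stack.dropLast hsub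
  have hlen : stack.dropLast.length + 1 = stack.length := by
    have : stack.length ≠ 0 := fun h0 => hs (List.eq_nil_of_length_eq_zero h0)
    simp [List.length_dropLast]; omega
  omega

-- one iteration of B's 'for n in nodes' loop: seen-check, dfs flood, parity tally
def pvStepB (da : PySem.Dict Int Int × PySem.Dict Int (List Int))
    (st : Int × Int × PySem.Set Int) (n : Int) : Int × Int × PySem.Set Int :=
  if PySem.Set.contains st.2.2 n then st
  else
    let comp := pvDfsLoop da.2 [n] (PySem.Set.add PySem.Set.empty n)
    let seen := PySem.Set.update st.2.2 comp
    let even : Int := (comp.countP (fun x => decide (PySem.Int.mod (x + da.1.getD x 0) 2 = 0)) : Int)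
    let a0 := if even = 1 then st.1 + 1 else st.1
    let a1 := if (comp.length : Int) - even = 1 then st.2.1 + 1 else st.2.1
    (a0, a1, seen)

def solution_alt (nodes : List Int) (edges : List (Int × Int)) : List Int :=
  let res := nodes.foldl (pvStepB (pvDegAdj edges)) (0, 0, PySem.Set.empty)
  [res.1, res.2.1]

-- ===== PRECONDITION & SPEC =====
-- all values mentioned by the input
def pvVals (nodes : List Int) (edges : List (Int × Int)) : List Int :=
  nodes ++ edges.flatMap (fun e => [e.1, e.2])

-- Pre_ excludes inputs mentioning a value outside [-1000001, 10^6] — A's fixed-size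
-- visited array raises IndexError whenever such a value is touched (its return when the
-- value is never reached is incidental) — and inputs containing an aliasing pair
-- {v, v+1000001}, where Python's negative-index wraparound makes A conflate two
-- distinct nodes in the shared visited array.
def Pre_solution (nodes : List Int) (edges : List (Int × Int)) : Prop :=
  (∀ v ∈ pvVals nodes edges, -1000001 ≤ v ∧ v ≤ 1000000) ∧
  (∀ v ∈ pvVals nodes edges, v < 0 → v + 1000001 ∉ pvVals nodes edges)
instance (nodes : List Int) (edges : List (Int × Int)) : Decidable (Pre_solution nodes edges) := by
  unfold Pre_solution; infer_instance

def pvWitness_solution : List Int × (List (Int × Int)) := ([1, 2, 7], [(1, 2), (3, -4)])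

def Spec_solution (nodes : List Int) (edges : List (Int × Int)) (out : List Int) : Prop :=
  out = solution_alt nodes edges
instance (nodes : List Int) (edges : List (Int × Int)) (out : List Int) :
    Decidable (Spec_solution nodes edges out) := by unfold Spec_solution; infer_instance

-- ===== CLAIM (what is proved, stated in full; the proofs are below) =====
def Claim_equal_solution : Prop := ∀ (nodes : List Int) (edges : List (Int × Int)),
  Dom_solution nodes edges → Pre_solution nodes edges →
  Spec_solution nodes edges (solution nodes edges)

-- ===== LEMMAS AND PROOFS =====


def pvSlot (i : Int) : Nat := if 0 ≤ i then i.toNat else 1000001 - (-i).toNat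

theorem pvIdx_eq (i : Int) (h1 : -1000001 ≤ i) (h2 : i ≤ 1000000) :
    PySem.List.pyIdx? 1000001 i = some (pvSlot i) ∧ pvSlot i < 1000001 := by
  unfold PySem.List.pyIdx? pvSlot
  split_ifs with h0 h3 h4
  all_goals first | exact ⟨rfl, by omega⟩ | (constructor <;> omega) | omega

theorem pvSlot_inj (x y : Int) (hx1 : -1000001 ≤ x) (hx2 : x ≤ 1000000)
    (hy1 : -1000001 ≤ y) (hy2 : y ≤ 1000000)
    (hno : ¬ (x < 0 ∧ y = x + 1000001) ∧ ¬ (y < 0 ∧ x = y + 1000001))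
    (h : pvSlot x = pvSlot y) : x = y := by
  unfold pvSlot at h
  split_ifs at h <;> omega

def pvRep (A : Finset Int) (v : List Bool) (S : Finset Int) : Prop :=
  v.length = 1000001 ∧ ∀ x ∈ A, PySem.List.pyGet? v x = some (decide (x ∈ S))

-- bounds assumption container
def pvOkA (A : Finset Int) : Prop :=
  (∀ v ∈ A, -1000001 ≤ v ∧ v ≤ 1000000) ∧ (∀ v ∈ A, v < 0 → v + 1000001 ∉ A)

theorem pvSlot_inj' (A : Finset Int) (hA : pvOkA A) (x y : Int) (hx : x ∈ A) (hy : y ∈ A)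
    (h : pvSlot x = pvSlot y) : x = y := by
  obtain ⟨hr, hn⟩ := hA
  refine pvSlot_inj x y (hr x hx).1 (hr x hx).2 (hr y hy).1 (hr y hy).2 ⟨?_, ?_⟩ h
  · rintro ⟨hx0, rfl⟩; exact hn x hx hx0 hy
  · rintro ⟨hy0, rfl⟩; exact hn y hy hy0 hx

theorem pvRep_read (A : Finset Int) (hA : pvOkA A) (v : List Bool) (S : Finset Int)
    (hrep : pvRep A v S) (x : Int) (hx : x ∈ A) :
    (PySem.List.pyGet? v x = some false ↔ x ∉ S) := by
  rw [hrep.2 x hx]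
  constructor
  · intro h hxS
    have := Option.some.inj h
    simp [hxS] at this
  · intro h
    simp [h]

theorem pvRep_write (A : Finset Int) (hA : pvOkA A) (v : List Bool) (S : Finset Int)
    (hrep : pvRep A v S) (x : Int) (hx : x ∈ A) :
    pvRep A (PySem.List.pySetD v x true) (insert x S) := by
  obtain ⟨hlen, hget⟩ := hrep
  have hxb := (hA.1 x hx)
  have hidx := pvIdx_eq x hxb.1 hxb.2
  have hset : PySem.List.pySetD v x true = v.set (pvSlot x) true := by
    unfold PySem.List.pySetD PySem.List.pySet?
    rw [hlen, hidx.1]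
    rfl
  constructor
  · rw [hset]; simp [hlen]
  · intro y hyA
    have hyb := hA.1 y hyA
    have hidy := pvIdx_eq y hyb.1 hyb.2
    unfold PySem.List.pyGet? at hget ⊢
    rw [hset]
    have hlen' : (v.set (pvSlot x) true).length = 1000001 := by simp [hlen]
    rw [hlen', hidy.1]
    by_cases hxy : y = x
    · subst hxy
      simp only [Option.bind_some]
      rw [List.getElem?_set_self (by omega)]
      simp
    · have hsl : pvSlot y ≠ pvSlot x := fun hq => hxy (pvSlot_inj' A hA y x hyA hx hq)
      simp only [Option.bind_some]
      rw [List.getElem?_set_ne hsl.symm]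
      have := hget y hyA
      rw [hlen, hidy.1] at this
      simp only [Option.bind_some] at this
      rw [this]
      simp [hxy]

def pvAdjL (edges : List (Int × Int)) (x : Int) : List Int :=
  edges.flatMap (fun e => (if e.1 = x then [e.2] else []) ++ (if e.2 = x then [e.1] else []))

def pvStep (edges : List (Int × Int)) (x y : Int) : Prop := (x, y) ∈ edges ∨ (y, x) ∈ edges

theorem pvGraphA_getD (edges : List (Int × Int)) (x : Int) :
    (pvGraphA edges).getD x [] = pvAdjL edges x := by
  suffices h : ∀ (es : List (Int × Int)) (g : PySem.Dict Int (List Int)),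
      (es.foldl (fun g e =>
        let g1 := g.insert e.1 (g.getD e.1 [] ++ [e.2])
        g1.insert e.2 (g1.getD e.2 [] ++ [e.1])) g).getD x [] = g.getD x [] ++ pvAdjL es x by
    have := h edges PySem.Dict.empty
    unfold pvGraphA
    rw [this]
    simp [PySem.Dict.getD_empty]
  intro es
  induction es with
  | nil => intro g; simp [pvAdjL]
  | cons e t ih =>
    intro g
    simp only [List.foldl_cons]
    rw [ih]
    unfold pvAdjL
    simp only [List.flatMap_cons]
    rw [PySem.Dict.getD_insert, PySem.Dict.getD_insert, PySem.Dict.getD_insert]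
    rcases e with ⟨a, b⟩
    simp only []
    by_cases h1 : a = x <;> by_cases h2 : b = x
    · subst h1; subst h2
      rw [if_pos rfl, if_pos rfl, if_pos rfl]
      simp [List.append_assoc]
    · subst h1
      rw [if_neg (fun hq : b = a => h2 hq), if_pos rfl, if_pos rfl]
      have h2' : ¬ a = b := fun hq => h2 hq.symm
      simp [h2, h2', List.append_assoc]
    · subst h2
      rw [if_pos rfl, if_neg (fun hq : a = b => h1 hq), if_pos rfl]
      have h1' : ¬ b = a := fun hq => h1 hq.symm
      simp [h1, h1', List.append_assoc]
    · rw [if_neg (fun hq : x = b => h2 hq.symm), if_neg (fun hq : x = a => h1 hq.symm), if_neg h2, if_neg h1]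
      simp

theorem pvMem_adjL (edges : List (Int × Int)) (x y : Int) :
    y ∈ pvAdjL edges x ↔ pvStep edges x y := by
  unfold pvAdjL pvStep
  simp only [List.mem_flatMap, List.mem_append]
  constructor
  · rintro ⟨e, he, h | h⟩
    · split_ifs at h with h1
      · simp at h; subst h; left; rw [← h1]; exact he
      · simp at h
    · split_ifs at h with h2
      · simp at h; subst h; right; rw [← h2]; exact he
      · simp at h
  · rintro (h | h)
    · exact ⟨(x, y), h, by simp⟩
    · exact ⟨(y, x), h, by simp⟩

def pvEP (edges : List (Int × Int)) : Finset Int := (edges.flatMap (fun e => [e.1, e.2])).toFinset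

theorem pvStep_mem_EP (edges : List (Int × Int)) (x y : Int) (h : pvStep edges x y) :
    x ∈ pvEP edges ∧ y ∈ pvEP edges := by
  unfold pvEP
  rcases h with h | h
  · constructor <;> simp only [List.mem_toFinset, List.mem_flatMap] <;>
      [exact ⟨(x,y), h, by simp⟩; exact ⟨(x,y), h, by simp⟩]
  · constructor <;> simp only [List.mem_toFinset, List.mem_flatMap] <;>
      [exact ⟨(y,x), h, by simp⟩; exact ⟨(y,x), h, by simp⟩]

theorem pvDegAdj_snd (edges : List (Int × Int)) : (pvDegAdj edges).2 = pvGraphA edges := by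
  unfold pvDegAdj pvGraphA
  suffices h : ∀ (es : List (Int × Int)) (p : PySem.Dict Int Int × PySem.Dict Int (List Int)),
      (es.foldl (fun p e =>
        let d1 := p.1.insert e.1 (p.1.getD e.1 0 + 1)
        let d2 := d1.insert e.2 (d1.getD e.2 0 + 1)
        let a1 := p.2.insert e.1 (p.2.getD e.1 [] ++ [e.2])
        let a2 := a1.insert e.2 (a1.getD e.2 [] ++ [e.1])
        (d2, a2)) p).2 = es.foldl (fun g e =>
          let g1 := g.insert e.1 (g.getD e.1 [] ++ [e.2])
          g1.insert e.2 (g1.getD e.2 [] ++ [e.1])) p.2 from h edges _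
  intro es
  induction es with
  | nil => intro p; rfl
  | cons e t ih => intro p; simp only [List.foldl_cons]; exact ih _

theorem pvDeg_eq (edges : List (Int × Int)) (x : Int) :
    (pvDegAdj edges).1.getD x 0 = (((pvGraphA edges).getD x []).length : Int) := by
  suffices h : ∀ (es : List (Int × Int)) (p : PySem.Dict Int Int × PySem.Dict Int (List Int)),
      (∀ z, p.1.getD z 0 = ((p.2.getD z []).length : Int)) →
      ∀ z, ((es.foldl (fun p e =>
        let d1 := p.1.insert e.1 (p.1.getD e.1 0 + 1)
        let d2 := d1.insert e.2 (d1.getD e.2 0 + 1)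
        let a1 := p.2.insert e.1 (p.2.getD e.1 [] ++ [e.2])
        let a2 := a1.insert e.2 (a1.getD e.2 [] ++ [e.1])
        (d2, a2)) p).1).getD z 0 = ((((es.foldl (fun p e =>
        let d1 := p.1.insert e.1 (p.1.getD e.1 0 + 1)
        let d2 := d1.insert e.2 (d1.getD e.2 0 + 1)
        let a1 := p.2.insert e.1 (p.2.getD e.1 [] ++ [e.2])
        let a2 := a1.insert e.2 (a1.getD e.2 [] ++ [e.1])
        (d2, a2)) p).2).getD z []).length : Int) by
    have h2 := h edges (PySem.Dict.empty, PySem.Dict.empty)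
      (by intro z; simp [PySem.Dict.getD_empty]) x
    have e1 : (pvDegAdj edges).1.getD x 0 = (((pvDegAdj edges).2.getD x []).length : Int) := h2
    rw [e1, pvDegAdj_snd]
  intro es
  induction es with
  | nil => intro p hp z; exact hp z
  | cons e t ih =>
    intro p hp z
    simp only [List.foldl_cons]
    refine ih _ ?_ z
    intro w
    simp only [PySem.Dict.getD_insert]
    by_cases h2 : w = e.2 <;> by_cases h1 : w = e.1 <;>
      simp only [h1, h2] <;> split_ifs <;> simp [hp] <;> push_cast <;> omega

def pvReach (edges : List (Int × Int)) : Int → Int → Prop := Relation.ReflTransGen (pvStep edges)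

theorem pvStep_symm (edges : List (Int × Int)) (x y : Int) (h : pvStep edges x y) : pvStep edges y x :=
  h.elim Or.inr Or.inl

noncomputable def pvClass (edges : List (Int × Int)) (start : Int) : Finset Int :=
  insert start (@Finset.filter _ (fun y => pvReach edges start y)
    (fun y => Classical.propDecidable _) (pvEP edges))

theorem pvReach_mem_EP (edges : List (Int × Int)) (s y : Int) (h : pvReach edges s y) :
    y = s ∨ y ∈ pvEP edges := by
  induction h with
  | refl => exact Or.inl rfl
  | tail h1 h2 ih => exact Or.inr (pvStep_mem_EP edges _ _ h2).2

theorem pvMem_class (edges : List (Int × Int)) (s y : Int) :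
    y ∈ pvClass edges s ↔ pvReach edges s y := by
  unfold pvClass
  simp only [Finset.mem_insert, Finset.mem_filter]
  constructor
  · rintro (rfl | ⟨_, h⟩)
    · exact Relation.ReflTransGen.refl
    · exact h
  · intro h
    rcases pvReach_mem_EP edges s y h with rfl | hy
    · exact Or.inl rfl
    · exact Or.inr ⟨hy, h⟩

theorem pvClass_closed (edges : List (Int × Int)) (s x y : Int)
    (hx : x ∈ pvClass edges s) (hst : pvStep edges x y) : y ∈ pvClass edges s := by
  rw [pvMem_class] at hx ⊢
  exact hx.tail hst

theorem pvClass_start (edges : List (Int × Int)) (s : Int) : s ∈ pvClass edges s := by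
  rw [pvMem_class]; exact Relation.ReflTransGen.refl

-- a Step-closed set not containing s avoids the whole class of s
theorem pvClass_disj (edges : List (Int × Int)) (S : Finset Int)
    (hcl : ∀ x ∈ S, ∀ y, pvStep edges x y → y ∈ S) (s : Int) (hs : s ∉ S) :
    ∀ y ∈ pvClass edges s, y ∉ S := by
  intro y hy
  rw [pvMem_class] at hy
  induction hy with
  | refl => exact hs
  | tail h1 h2 ih =>
    intro hc
    exact ih (hcl _ hc _ (pvStep_symm edges _ _ h2))

-- parity predicate and counts
abbrev pvEvenN (edges : List (Int × Int)) (x : Int) : Prop :=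
  PySem.Int.mod (x + (((pvGraphA edges).getD x []).length : Int)) 2 = 0

def pvCntE (edges : List (Int × Int)) (s : Finset Int) : Nat :=
  (s.filter (fun x => pvEvenN edges x)).card
def pvCntO (edges : List (Int × Int)) (s : Finset Int) : Nat :=
  (s.filter (fun x => ¬ pvEvenN edges x)).card

theorem pvCnt_insert (edges : List (Int × Int)) (s : Finset Int) (x : Int) (hx : x ∉ s) :
    (pvEvenN edges x → pvCntE edges (insert x s) = pvCntE edges s + 1 ∧
      pvCntO edges (insert x s) = pvCntO edges s) ∧
    (¬ pvEvenN edges x → pvCntE edges (insert x s) = pvCntE edges s ∧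
      pvCntO edges (insert x s) = pvCntO edges s + 1) := by
  unfold pvCntE pvCntO
  constructor
  · intro he
    rw [Finset.filter_insert, Finset.filter_insert]
    constructor
    · rw [if_pos he, Finset.card_insert_of_notMem (by simp [hx])]
    · rw [if_neg (not_not_intro he)]
  · intro he
    rw [Finset.filter_insert, Finset.filter_insert]
    constructor
    · rw [if_neg he]
    · rw [if_pos he, Finset.card_insert_of_notMem (by simp [hx])]

theorem pvCnt_card (edges : List (Int × Int)) (s : Finset Int) :
    pvCntE edges s + pvCntO edges s = s.card := by
  classical
  induction s using Finset.induction_on with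
  | empty => simp [pvCntE, pvCntO]
  | insert x s hx ih =>
    rcases pvCnt_insert edges s x hx with ⟨h1, h2⟩
    by_cases he : pvEvenN edges x
    · rw [(h1 he).1, (h1 he).2, Finset.card_insert_of_notMem hx]; omega
    · rw [(h2 he).1, (h2 he).2, Finset.card_insert_of_notMem hx]; omega

def pvAV (nodes : List Int) (edges : List (Int × Int)) : Finset Int := (pvVals nodes edges).toFinset

theorem pvOkA_of_pre (nodes : List Int) (edges : List (Int × Int)) (h : Pre_solution nodes edges) :
    pvOkA (pvAV nodes edges) := by
  obtain ⟨h1, h2⟩ := h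
  constructor
  · intro v hv; exact h1 v (List.mem_toFinset.mp hv)
  · intro v hv hneg hmem
    exact h2 v (List.mem_toFinset.mp hv) hneg (List.mem_toFinset.mp hmem)

theorem pvEP_sub_AV (nodes : List Int) (edges : List (Int × Int)) :
    pvEP edges ⊆ pvAV nodes edges := by
  intro x hx
  unfold pvEP at hx
  unfold pvAV pvVals
  rw [List.mem_toFinset] at hx ⊢
  exact List.mem_append_right _ hx

theorem pvClass_sub_AV (nodes : List Int) (edges : List (Int × Int)) (s : Int)
    (hs : s ∈ pvAV nodes edges) : ∀ y ∈ pvClass edges s, y ∈ pvAV nodes edges := by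
  intro y hy
  rcases pvReach_mem_EP edges s y ((pvMem_class edges s y).mp hy) with rfl | h
  · exact hs
  · exact pvEP_sub_AV nodes edges h

theorem pvAdj_mem_EP (edges : List (Int × Int)) (x y : Int)
    (h : y ∈ (pvGraphA edges).getD x []) : y ∈ pvEP edges := by
  rw [pvGraphA_getD, pvMem_adjL] at h
  exact (pvStep_mem_EP edges x y h).2

-- the inner marking loop of bfs: marks the unseen elements of l and appends them to the queue
theorem pvFoldMark (A : Finset Int) (hA : pvOkA A) :
    ∀ (l : List Int) (v : List Bool) (q : List Int) (M : Finset Int),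
      pvRep A v M → (∀ y ∈ l, y ∈ A) → (∀ y ∈ q, y ∈ M) →
      ∃ (v' : List Bool) (new : List Int),
        (l.foldl (fun (vq : List Bool × List Int) nxt =>
          if PySem.List.pyGet? vq.1 nxt = some false then
            (PySem.List.pySetD vq.1 nxt true, vq.2 ++ [nxt])
          else vq) (v, q)) = (v', q ++ new) ∧
        pvRep A v' (M ∪ new.toFinset) ∧ new.Nodup ∧
        (∀ y ∈ new, y ∈ l ∧ y ∉ M) ∧ (∀ y ∈ l, y ∈ M ∨ y ∈ new) ∧
        v'.count false + new.length = v.count false := by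
  intro l
  induction l with
  | nil =>
    intro v q M hrep _ _
    exact ⟨v, [], by simp, by simpa using hrep, by simp, by simp, by simp, by simp⟩
  | cons y t ih =>
    intro v q M hrep hl hq
    have hyA : y ∈ A := hl y List.mem_cons_self
    simp only [List.foldl_cons]
    by_cases hy : y ∈ M
    · rw [if_neg (by rw [pvRep_read A hA v M hrep y hyA]; simpa using hy)]
      obtain ⟨v', new, e1, e2, e3, e4, e5, e6⟩ :=
        ih v q M hrep (fun z hz => hl z (List.mem_cons_of_mem _ hz)) hq
      refine ⟨v', new, e1, e2, e3, fun z hz => ⟨List.mem_cons_of_mem _ (e4 z hz).1, (e4 z hz).2⟩, ?_, e6⟩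
      intro z hz
      rcases List.mem_cons.mp hz with rfl | hz
      · exact Or.inl hy
      · exact e5 z hz
    · rw [if_pos (by rw [pvRep_read A hA v M hrep y hyA]; exact hy)]
      have hrep1 := pvRep_write A hA v M hrep y hyA
      obtain ⟨v', new, e1, e2, e3, e4, e5, e6⟩ :=
        ih (PySem.List.pySetD v y true) (q ++ [y]) (insert y M) hrep1
          (fun z hz => hl z (List.mem_cons_of_mem _ hz))
          (by intro z hz
              rcases List.mem_append.mp hz with hz | hz
              · exact Finset.mem_insert_of_mem (hq z hz)
              · simp at hz; subst hz; exact Finset.mem_insert_self _ _)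
      refine ⟨v', y :: new, ?_, ?_, ?_, ?_, ?_, ?_⟩
      · rw [e1, List.append_assoc]; try rfl
      · have : insert y M ∪ new.toFinset = M ∪ (y :: new).toFinset := by
          ext z; simp; try tauto
        rwa [this] at e2
      · refine List.nodup_cons.mpr ⟨?_, e3⟩
        intro hc
        exact (e4 y hc).2 (Finset.mem_insert_self _ _)
      · intro z hz
        rcases List.mem_cons.mp hz with rfl | hz
        · exact ⟨List.mem_cons_self, hy⟩
        · refine ⟨List.mem_cons_of_mem _ (e4 z hz).1, ?_⟩
          intro hc
          exact (e4 z hz).2 (Finset.mem_insert_of_mem hc)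
      · intro z hz
        rcases List.mem_cons.mp hz with rfl | hz
        · exact Or.inr List.mem_cons_self
        · rcases e5 z hz with h | h
          · rcases Finset.mem_insert.mp h with rfl | h
            · exact Or.inr List.mem_cons_self
            · exact Or.inl h
          · exact Or.inr (List.mem_cons_of_mem _ h)
      · have hm := pvMark_measure v y (by rw [pvRep_read A hA v M hrep y hyA]; exact hy)
        simp only [List.length_cons]
        omega

-- encoding of the root-chance flag machine after c triggering nodes
def pvEncE (c : Nat) : Bool × Int := (decide (c ≤ 1), if c = 0 then 1 else 0)

theorem pvParity (x c : Int) :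
    (PySem.Int.mod (x + (c - 1)) 2 = 1 ↔ PySem.Int.mod (x + c) 2 = 0) ∧
    (PySem.Int.mod (x + (c - 1)) 2 = 0 ↔ ¬ PySem.Int.mod (x + c) 2 = 0) ∧
    (¬ PySem.Int.mod (x + c) 2 = 1 ↔ PySem.Int.mod (x + c) 2 = 0) := by
  rw [PySem.Int.mod_eq_emod_of_pos (a := x + (c - 1)) (by norm_num),
      PySem.Int.mod_eq_emod_of_pos (a := x + c) (by norm_num)]
  refine ⟨?_, ?_, ?_⟩ <;> omega

theorem pvBfs_nil (nodes : List Int) (edges : List (Int × Int))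
    (S : Finset Int)
    (start : Int) (v : List Bool) (P : Finset Int)
    (isH : Bool) (hC : Int) (isR : Bool) (rC : Int)
    (hPC : P ⊆ pvClass edges start)
    (hcl : ∀ x ∈ P, ∀ y, pvStep edges x y → y ∈ P ∨ y ∈ ([] : List Int))
    (hst : start ∈ P ∨ start ∈ ([] : List Int))
    (hrep : pvRep (pvAV nodes edges) v (S ∪ (P ∪ (List.toFinset ([] : List Int)))))
    (hE : (isH, hC) = pvEncE (pvCntE edges P))
    (hO : (isR, rC) = pvEncE (pvCntO edges P)) :
    ∃ v' : List Bool,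
      pvBfsLoop (pvGraphA edges) [] v isH hC isR rC =
        (v', (pvEncE (pvCntE edges (pvClass edges start))).1,
             (pvEncE (pvCntE edges (pvClass edges start))).2,
             (pvEncE (pvCntO edges (pvClass edges start))).1,
             (pvEncE (pvCntO edges (pvClass edges start))).2) ∧
      pvRep (pvAV nodes edges) v' (S ∪ pvClass edges start) := by
  have hstart : start ∈ P := by simpa using hst
  have hCP : ∀ y, pvReach edges start y → y ∈ P := by
    intro y hy
    induction hy with
    | refl => exact hstart
    | tail h1 h2 ih =>
      rcases hcl _ ih _ h2 with h | h
      · exact h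
      · simp at h
  have hPeq : P = pvClass edges start := by
    apply Finset.Subset.antisymm hPC
    intro y hy
    exact hCP y ((pvMem_class edges start y).mp hy)
  refine ⟨v, ?_, ?_⟩
  · rw [pvBfsLoop]
    rw [← hPeq, ← hE, ← hO]
  · have : S ∪ (P ∪ (List.toFinset ([] : List Int))) = S ∪ pvClass edges start := by
      rw [← hPeq]; simp
    rwa [this] at hrep

theorem pvMachineT (x len : Int) (isH : Bool) (hC : Int) (c : Nat)
    (hE : (isH, hC) = pvEncE c)
    (houter : PySem.Int.mod (x + (len - 1)) 2 = 1)
    (hinner : ¬ PySem.Int.mod (x + len) 2 = 1) :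
    (if PySem.Int.mod (x + (len - 1)) 2 = 1 then
       if hC ≠ 0 then (if PySem.Int.mod (x + len) 2 = 1 then false else isH, hC - 1)
       else (false, hC)
     else (isH, hC)) = pvEncE (c + 1) := by
  rw [if_pos houter]
  rw [Prod.mk.injEq] at hE
  obtain ⟨h1, h2⟩ := hE
  cases c with
  | zero =>
    rw [if_pos (by rw [h2]; simp [pvEncE])]
    rw [if_neg hinner]
    simp [pvEncE] at h1 h2 ⊢
    exact ⟨h1, by omega⟩
  | succ k =>
    rw [if_neg (by rw [h2]; simp [pvEncE])]
    simp [pvEncE] at h2 ⊢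
    exact h2

theorem pvMachineF (x len : Int) (isH : Bool) (hC : Int) (c : Nat)
    (hE : (isH, hC) = pvEncE c)
    (houter : ¬ PySem.Int.mod (x + (len - 1)) 2 = 1) :
    (if PySem.Int.mod (x + (len - 1)) 2 = 1 then
       if hC ≠ 0 then (if PySem.Int.mod (x + len) 2 = 1 then false else isH, hC - 1)
       else (false, hC)
     else (isH, hC)) = pvEncE c := by
  rw [if_neg houter]; exact hE

-- reverse machine: same shape with the tests on = 0
theorem pvMachineT0 (x len : Int) (isR : Bool) (rC : Int) (c : Nat)
    (hE : (isR, rC) = pvEncE c)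
    (houter : PySem.Int.mod (x + (len - 1)) 2 = 0)
    (hinner : ¬ PySem.Int.mod (x + len) 2 = 0) :
    (if PySem.Int.mod (x + (len - 1)) 2 = 0 then
       if rC ≠ 0 then (if PySem.Int.mod (x + len) 2 = 0 then false else isR, rC - 1)
       else (false, rC)
     else (isR, rC)) = pvEncE (c + 1) := by
  rw [if_pos houter]
  rw [Prod.mk.injEq] at hE
  obtain ⟨h1, h2⟩ := hE
  cases c with
  | zero =>
    rw [if_pos (by rw [h2]; simp [pvEncE])]
    rw [if_neg hinner]
    simp [pvEncE] at h1 h2 ⊢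
    exact ⟨h1, by omega⟩
  | succ k =>
    rw [if_neg (by rw [h2]; simp [pvEncE])]
    simp [pvEncE] at h2 ⊢
    exact h2

theorem pvMachineF0 (x len : Int) (isR : Bool) (rC : Int) (c : Nat)
    (hE : (isR, rC) = pvEncE c)
    (houter : ¬ PySem.Int.mod (x + (len - 1)) 2 = 0) :
    (if PySem.Int.mod (x + (len - 1)) 2 = 0 then
       if rC ≠ 0 then (if PySem.Int.mod (x + len) 2 = 0 then false else isR, rC - 1)
       else (false, rC)
     else (isR, rC)) = pvEncE c := by
  rw [if_neg houter]; exact hE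

theorem pvBfs_main (nodes : List Int) (edges : List (Int × Int))
    (hA : pvOkA (pvAV nodes edges))
    (S : Finset Int) (hScl : ∀ x ∈ S, ∀ y, pvStep edges x y → y ∈ S)
    (start : Int) (hstart : start ∈ pvAV nodes edges) (hsS : start ∉ S) :
    ∀ (n : Nat) (q : List Int) (v : List Bool) (P : Finset Int)
      (isH : Bool) (hC : Int) (isR : Bool) (rC : Int),
      2 * v.count false + q.length ≤ n →
      q.Nodup →
      (∀ y ∈ q, y ∈ pvClass edges start) →
      (∀ y ∈ q, y ∉ P) →
      P ⊆ pvClass edges start →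
      (∀ x ∈ P, ∀ y, pvStep edges x y → y ∈ P ∨ y ∈ q) →
      (start ∈ P ∨ start ∈ q) →
      pvRep (pvAV nodes edges) v (S ∪ (P ∪ q.toFinset)) →
      (isH, hC) = pvEncE (pvCntE edges P) →
      (isR, rC) = pvEncE (pvCntO edges P) →
      ∃ v' : List Bool,
        pvBfsLoop (pvGraphA edges) q v isH hC isR rC =
          (v', (pvEncE (pvCntE edges (pvClass edges start))).1,
               (pvEncE (pvCntE edges (pvClass edges start))).2,
               (pvEncE (pvCntO edges (pvClass edges start))).1,
               (pvEncE (pvCntO edges (pvClass edges start))).2) ∧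
        pvRep (pvAV nodes edges) v' (S ∪ pvClass edges start) := by
  intro n
  induction n with
  | zero =>
    intro q v P isH hC isR rC hm hnd hqC hqP hPC hcl hst hrep hE hO
    have hq : q = [] := by
      cases q with
      | nil => rfl
      | cons a t => simp [List.length_cons] at hm
    subst hq
    exact pvBfs_nil nodes edges S start v P isH hC isR rC hPC hcl hst hrep hE hO
  | succ n ih =>
    intro q v P isH hC isR rC hm hnd hqC hqP hPC hcl hst hrep hE hO
    cases q with
    | nil => exact pvBfs_nil nodes edges S start v P isH hC isR rC hPC hcl hst hrep hE hO
    | cons node qRest =>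
      have hnodeC : node ∈ pvClass edges start := hqC node List.mem_cons_self
      have hnodeA : node ∈ pvAV nodes edges :=
        pvClass_sub_AV nodes edges start hstart node hnodeC
      have hnodeP : node ∉ P := hqP node List.mem_cons_self
      have hCdisj : ∀ y ∈ pvClass edges start, y ∉ S := pvClass_disj edges S hScl start hsS
      -- the adjacency list of node
      have hladj : ∀ y ∈ (pvGraphA edges).getD node [], y ∈ pvAV nodes edges :=
        fun y hy => pvEP_sub_AV nodes edges (pvAdj_mem_EP edges node y hy)
      have hqM : ∀ y ∈ qRest, y ∈ S ∪ (P ∪ (node :: qRest).toFinset) := by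
        intro y hy; simp [hy]
      obtain ⟨v', new, e1, e2, e3, e4, e5, e6⟩ :=
        pvFoldMark (pvAV nodes edges) hA ((pvGraphA edges).getD node []) v qRest
          (S ∪ (P ∪ (node :: qRest).toFinset)) hrep hladj hqM
      -- new elements are in the class (they are neighbours of node)
      have hnewC : ∀ y ∈ new, y ∈ pvClass edges start := by
        intro y hy
        have := (e4 y hy).1
        rw [pvGraphA_getD, pvMem_adjL] at this
        exact pvClass_closed edges start node y hnodeC this
      -- machine counts
      have hcE := pvCnt_insert edges P node hnodeP
      rw [pvBfsLoop]
      rw [e1]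
      -- apply the induction hypothesis with P' = insert node P, q' = qRest ++ new
      have happ := ih (qRest ++ new) v' (insert node P)
        (if PySem.Int.mod (node + ((((pvGraphA edges).getD node []).length : Int) - 1)) 2 = 1 then
           if hC ≠ 0 then
             (if PySem.Int.mod (node + (((pvGraphA edges).getD node []).length : Int)) 2 = 1 then false else isH, hC - 1)
           else (false, hC)
         else (isH, hC)).1
        (if PySem.Int.mod (node + ((((pvGraphA edges).getD node []).length : Int) - 1)) 2 = 1 then
           if hC ≠ 0 then
             (if PySem.Int.mod (node + (((pvGraphA edges).getD node []).length : Int)) 2 = 1 then false else isH, hC - 1)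
           else (false, hC)
         else (isH, hC)).2
        (if PySem.Int.mod (node + ((((pvGraphA edges).getD node []).length : Int) - 1)) 2 = 0 then
           if rC ≠ 0 then
             (if PySem.Int.mod (node + (((pvGraphA edges).getD node []).length : Int)) 2 = 0 then false else isR, rC - 1)
           else (false, rC)
         else (isR, rC)).1
        (if PySem.Int.mod (node + ((((pvGraphA edges).getD node []).length : Int) - 1)) 2 = 0 then
           if rC ≠ 0 then
             (if PySem.Int.mod (node + (((pvGraphA edges).getD node []).length : Int)) 2 = 0 then false else isR, rC - 1)
           else (false, rC)
         else (isR, rC)).2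
        (by simp only [List.length_append, List.length_cons] at hm ⊢; omega)
        (by -- Nodup of qRest ++ new
          exact ((List.nodup_cons.mp hnd).2).append e3
            (fun a ha1 ha2 => (e4 a ha2).2 (by simp [ha1])))
        (by intro y hy
            rcases List.mem_append.mp hy with hy | hy
            · exact hqC y (List.mem_cons_of_mem _ hy)
            · exact hnewC y hy)
        (by intro y hy hyP
            rcases List.mem_append.mp hy with hy | hy
            · rcases Finset.mem_insert.mp hyP with rfl | hyP
              · exact (List.nodup_cons.mp hnd).1 hy
              · exact hqP y (List.mem_cons_of_mem _ hy) hyP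
            · exact (e4 y hy).2 (by rcases Finset.mem_insert.mp hyP with rfl | hyP <;> simp [hyP]))
        (by intro y hy
            rcases Finset.mem_insert.mp hy with rfl | hy
            · exact hnodeC
            · exact hPC hy)
        (by -- closure for insert node P
          intro x hx y hstp
          rcases Finset.mem_insert.mp hx with rfl | hx
          · -- x = node : y is in its adjacency list, hence marked after the fold
            have hyl : y ∈ (pvGraphA edges).getD x [] := by
              rw [pvGraphA_getD, pvMem_adjL]; exact hstp
            have hyC : y ∈ pvClass edges start := pvClass_closed edges start x y hnodeC hstp
            rcases e5 y hyl with hy | hy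
            · rcases Finset.mem_union.mp hy with hy | hy
              · exact absurd hy (hCdisj y hyC)
              · rcases Finset.mem_union.mp hy with hy | hy
                · exact Or.inl (Finset.mem_insert_of_mem hy)
                · rcases List.mem_cons.mp (List.mem_toFinset.mp hy) with rfl | hy'
                  · exact Or.inl (Finset.mem_insert_self _ _)
                  · exact Or.inr (List.mem_append_left _ hy')
            · exact Or.inr (List.mem_append_right _ hy)
          · rcases hcl x hx y hstp with hy | hy
            · exact Or.inl (Finset.mem_insert_of_mem hy)
            · rcases List.mem_cons.mp hy with rfl | hy
              · exact Or.inl (Finset.mem_insert_self _ _)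
              · exact Or.inr (List.mem_append_left _ hy))
        (by rcases hst with h | h
            · exact Or.inl (Finset.mem_insert_of_mem h)
            · rcases List.mem_cons.mp h with rfl | h
              · exact Or.inl (Finset.mem_insert_self _ _)
              · exact Or.inr (List.mem_append_left _ h))
        (by -- representation
          have hMeq : (S ∪ (P ∪ (node :: qRest).toFinset)) ∪ new.toFinset =
              S ∪ (insert node P ∪ (qRest ++ new).toFinset) := by
            ext z; simp; try tauto
          rwa [hMeq] at e2)
        (by -- even-count machine
          rw [Prod.mk.eta]
          by_cases he : PySem.Int.mod (node + (((pvGraphA edges).getD node []).length : Int)) 2 = 0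
          · rw [(hcE.1 (by exact he)).1]
            exact pvMachineT node (((pvGraphA edges).getD node []).length : Int) isH hC
              (pvCntE edges P) hE
              ((pvParity node (((pvGraphA edges).getD node []).length : Int)).1.mpr he)
              (by rw [(pvParity node (((pvGraphA edges).getD node []).length : Int)).2.2]; exact he)
          · rw [(hcE.2 (by exact he)).1]
            exact pvMachineF node (((pvGraphA edges).getD node []).length : Int) isH hC
              (pvCntE edges P) hE
              (fun hc => he ((pvParity node (((pvGraphA edges).getD node []).length : Int)).1.mp hc)))
        (by -- odd-count machine
          rw [Prod.mk.eta]
          by_cases he : PySem.Int.mod (node + (((pvGraphA edges).getD node []).length : Int)) 2 = 0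
          · rw [(hcE.1 (by exact he)).2]
            exact pvMachineF0 node (((pvGraphA edges).getD node []).length : Int) isR rC
              (pvCntO edges P) hO
              (fun hc => (pvParity node (((pvGraphA edges).getD node []).length : Int)).2.1.mp hc he)
          · rw [(hcE.2 (by exact he)).2]
            exact pvMachineT0 node (((pvGraphA edges).getD node []).length : Int) isR rC
              (pvCntO edges P) hO
              ((pvParity node (((pvGraphA edges).getD node []).length : Int)).2.1.mpr he)
              he)
      obtain ⟨v'', h1, h2⟩ := happ
      exact ⟨v'', h1, h2⟩

-- the inner loop of the dfs: appends the unseen neighbours to comp and to the stack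
theorem pvDfsFold :
    ∀ (l : List Int) (comp : PySem.Set Int) (st : List Int),
      ∃ new : List Int,
        (l.foldl (fun (p : PySem.Set Int × List Int) y =>
          if PySem.Set.contains p.1 y then p else (PySem.Set.add p.1 y, p.2 ++ [y])) (comp, st)) =
            (comp ++ new, st ++ new) ∧
        new.Nodup ∧ (∀ y ∈ new, y ∈ l ∧ y ∉ comp) ∧ (∀ y ∈ l, y ∈ comp ∨ y ∈ new) := by
  intro l
  induction l with
  | nil => intro comp st; exact ⟨[], by simp, by simp, by simp, by simp⟩
  | cons y t ih =>
    intro comp st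
    simp only [List.foldl_cons]
    by_cases hy : y ∈ comp
    · rw [if_pos (by simpa using hy)]
      obtain ⟨new, e1, e2, e3, e4⟩ := ih comp st
      refine ⟨new, e1, e2, fun z hz => ⟨List.mem_cons_of_mem _ (e3 z hz).1, (e3 z hz).2⟩, ?_⟩
      intro z hz
      rcases List.mem_cons.mp hz with rfl | hz
      · exact Or.inl hy
      · exact e4 z hz
    · rw [if_neg (by simpa using hy)]
      rw [PySem.Set.add_of_not_mem hy]
      obtain ⟨new, e1, e2, e3, e4⟩ := ih (comp ++ [y]) (st ++ [y])
      refine ⟨y :: new, ?_, ?_, ?_, ?_⟩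
      · rw [e1]; simp
      · refine List.nodup_cons.mpr ⟨fun hc => (e3 y hc).2 (by simp), e2⟩
      · intro z hz
        rcases List.mem_cons.mp hz with rfl | hz
        · exact ⟨List.mem_cons_self, hy⟩
        · refine ⟨List.mem_cons_of_mem _ (e3 z hz).1, fun hc => (e3 z hz).2 (by simp [hc])⟩
      · intro z hz
        rcases List.mem_cons.mp hz with rfl | hz
        · exact Or.inr List.mem_cons_self
        · rcases e4 z hz with h | h
          · rcases List.mem_append.mp h with h | h
            · exact Or.inl h
            · simp at h; subst h; exact Or.inr List.mem_cons_self
          · exact Or.inr (List.mem_cons_of_mem _ h)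

theorem pvDfs_main (edges : List (Int × Int)) (start : Int) :
    ∀ (n : Nat) (stack : List Int) (comp : PySem.Set Int),
      2 * (((pvGraphA edges).values.flatten.toFinset) \ comp.toFinset).card + stack.length ≤ n →
      comp.Nodup → stack.Nodup →
      (∀ y ∈ stack, y ∈ comp) →
      (∀ y ∈ comp, y ∈ pvClass edges start) →
      start ∈ comp →
      (∀ x ∈ comp, x ∉ stack → ∀ y, pvStep edges x y → y ∈ comp) →
      (pvDfsLoop (pvGraphA edges) stack comp).Nodup ∧
        (pvDfsLoop (pvGraphA edges) stack comp).toFinset = pvClass edges start := by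
  intro n
  induction n with
  | zero =>
    intro stack comp hm hc hs hsc hcC hst hcl
    have hq : stack = [] := by
      cases stack with
      | nil => rfl
      | cons a t => simp [List.length_cons] at hm
    subst hq
    rw [pvDfsLoop]
    simp only [dif_pos rfl]
    refine ⟨hc, ?_⟩
    ext z
    rw [List.mem_toFinset]
    constructor
    · exact fun hz => hcC z hz
    · intro hz
      have hr := (pvMem_class edges start z).mp hz
      induction hr with
      | refl => exact hst
      | tail h1 h2 ihh =>
        exact hcl _ (ihh ((pvMem_class edges start _).mpr h1)) (by simp) _ h2
  | succ n ih =>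
    intro stack comp hm hc hs hsc hcC hst hcl
    cases hstk : stack with
    | nil =>
      subst hstk
      rw [pvDfsLoop]
      simp only [dif_pos rfl]
      refine ⟨hc, ?_⟩
      ext z
      rw [List.mem_toFinset]
      constructor
      · exact fun hz => hcC z hz
      · intro hz
        have hr := (pvMem_class edges start z).mp hz
        induction hr with
        | refl => exact hst
        | tail h1 h2 ihh =>
          exact hcl _ (ihh ((pvMem_class edges start _).mpr h1)) (by simp) _ h2
    | cons a t =>
      subst hstk
      have hne : (a :: t) ≠ ([] : List Int) := by simp
      rw [pvDfsLoop]
      rw [dif_neg hne]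
      show (pvDfsLoop (pvGraphA edges) (((pvGraphA edges).getD ((a :: t).getLast hne) []).foldl (fun (p : PySem.Set Int × List Int) y => if PySem.Set.contains p.1 y then p else (PySem.Set.add p.1 y, p.2 ++ [y])) (comp, (a :: t).dropLast)).2 (((pvGraphA edges).getD ((a :: t).getLast hne) []).foldl (fun (p : PySem.Set Int × List Int) y => if PySem.Set.contains p.1 y then p else (PySem.Set.add p.1 y, p.2 ++ [y])) (comp, (a :: t).dropLast)).1).Nodup ∧
        (pvDfsLoop (pvGraphA edges) (((pvGraphA edges).getD ((a :: t).getLast hne) []).foldl (fun (p : PySem.Set Int × List Int) y => if PySem.Set.contains p.1 y then p else (PySem.Set.add p.1 y, p.2 ++ [y])) (comp, (a :: t).dropLast)).2 (((pvGraphA edges).getD ((a :: t).getLast hne) []).foldl (fun (p : PySem.Set Int × List Int) y => if PySem.Set.contains p.1 y then p else (PySem.Set.add p.1 y, p.2 ++ [y])) (comp, (a :: t).dropLast)).1).toFinset = pvClass edges start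
      obtain ⟨new, e1, e2, e3, e4⟩ :=
        pvDfsFold ((pvGraphA edges).getD ((a :: t).getLast hne) []) comp ((a :: t).dropLast)
      rw [e1]
      set x := (a :: t).getLast hne with hxdef
      have hxstack : x ∈ (a :: t) := List.getLast_mem hne
      have hxcomp : x ∈ comp := hsc x hxstack
      have hxC : x ∈ pvClass edges start := hcC x hxcomp
      have hstackeq : (a :: t).dropLast ++ [x] = a :: t := List.dropLast_concat_getLast hne
      have hnewC : ∀ y ∈ new, y ∈ pvClass edges start := by
        intro y hy
        have hyl := (e3 y hy).1
        rw [pvGraphA_getD, pvMem_adjL] at hyl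
        exact pvClass_closed edges start x y hxC hyl
      have hnewU : ∀ y ∈ new, y ∈ (pvGraphA edges).values.flatten := by
        intro y hy
        exact pvAdjVal_mem (pvGraphA edges) x y (e3 y hy).1
      have hdropnd : (a :: t).dropLast.Nodup := List.Nodup.sublist (List.dropLast_sublist _) hs
      have hdromem : ∀ y ∈ (a :: t).dropLast, y ∈ a :: t :=
        fun y hy => List.mem_of_mem_dropLast hy
      apply ih
      · -- measure
        have hsub : new.toFinset ⊆ ((pvGraphA edges).values.flatten.toFinset) \ comp.toFinset := by
          intro z hz
          rw [List.mem_toFinset] at hz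
          rw [Finset.mem_sdiff, List.mem_toFinset, List.mem_toFinset]
          exact ⟨hnewU z hz, (e3 z hz).2⟩
        have hcardle := Finset.card_le_card hsub
        have hcard : (((pvGraphA edges).values.flatten.toFinset) \ (comp ++ new).toFinset).card =
            (((pvGraphA edges).values.flatten.toFinset) \ comp.toFinset).card - new.length := by
          have hone : ((pvGraphA edges).values.flatten.toFinset) \ (comp ++ new).toFinset =
              (((pvGraphA edges).values.flatten.toFinset) \ comp.toFinset) \ new.toFinset := by
            ext z; simp only [Finset.mem_sdiff, List.mem_toFinset, List.mem_append]; tauto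
          have hnl : new.toFinset.card = new.length := List.toFinset_card_of_nodup e2
          rw [hone, Finset.card_sdiff, Finset.inter_eq_left.mpr hsub, hnl]
        have hnle : new.length ≤ (((pvGraphA edges).values.flatten.toFinset) \ comp.toFinset).card := by
          have := Finset.card_le_card hsub
          rwa [List.toFinset_card_of_nodup e2] at this
        have hlen2 : ((a :: t).dropLast ++ new).length + 1 = (a :: t).length + new.length := by
          simp [List.length_dropLast]; omega
        rw [hcard]
        have hgg : ((comp ++ new, (a :: t).dropLast ++ new).2).length =
            ((a :: t).dropLast ++ new).length := rfl
        omega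
      · -- comp ++ new nodup
        exact hc.append e2 (fun z hz1 hz2 => (e3 z hz2).2 hz1)
      · exact hdropnd.append e2 (fun z hz1 hz2 => (e3 z hz2).2 (hsc z (hdromem z hz1)))
      · intro y hy
        rcases List.mem_append.mp hy with hy | hy
        · exact List.mem_append_left _ (hsc y (hdromem y hy))
        · exact List.mem_append_right _ hy
      · intro y hy
        rcases List.mem_append.mp hy with hy | hy
        · exact hcC y hy
        · exact hnewC y hy
      · exact List.mem_append_left _ hst
      · -- closure
        intro z hz hznot y hstp
        rcases List.mem_append.mp hz with hz | hz
        · by_cases hzx : z = x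
          · subst hzx
            have hyl : y ∈ (pvGraphA edges).getD x [] := by
              rw [pvGraphA_getD, pvMem_adjL]; exact hstp
            rcases e4 y hyl with h | h
            · exact List.mem_append_left _ h
            · exact List.mem_append_right _ h
          · have hznotstack : z ∉ (a :: t) := by
              intro hzs
              rw [← hstackeq] at hzs
              rcases List.mem_append.mp hzs with hzs | hzs
              · exact hznot (List.mem_append_left _ hzs)
              · simp at hzs; exact hzx hzs
            exact List.mem_append_left _ (hcl z hz hznotstack y hstp)
        · exact absurd (List.mem_append_right ((a :: t).dropLast) hz) hznot

theorem pvFinalFlag (c : Nat) :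
    (if (pvEncE c).1 && decide ((pvEncE c).2 ≠ 0) then false else (pvEncE c).1) =
      decide (c = 1) := by
  rcases c with _ | _ | c <;> simp [pvEncE]

theorem pvCountP_congr (l : List Int) (p q : Int → Bool) (h : ∀ a ∈ l, p a = q a) :
    l.countP p = l.countP q := by
  induction l with
  | nil => rfl
  | cons x t ih =>
    rw [List.countP_cons, List.countP_cons, h x List.mem_cons_self,
      ih (fun a ha => h a (List.mem_cons_of_mem _ ha))]

theorem pvCnt_list (edges : List (Int × Int)) (l : List Int) (hl : l.Nodup) :
    l.countP (fun x => decide (PySem.Int.mod (x + (pvDegAdj edges).1.getD x 0) 2 = 0)) =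
      pvCntE edges l.toFinset := by
  have h1 : l.countP (fun x => decide (PySem.Int.mod (x + (pvDegAdj edges).1.getD x 0) 2 = 0)) =
      l.countP (fun x => decide (pvEvenN edges x)) := by
    apply pvCountP_congr
    intro a _
    simp only [pvEvenN, pvDeg_eq]
  rw [h1]
  rw [List.countP_eq_length_filter]
  have h2 : (l.filter (fun x => decide (pvEvenN edges x))).toFinset.card =
      (l.filter (fun x => decide (pvEvenN edges x))).length :=
    List.toFinset_card_of_nodup (hl.filter _)
  rw [← h2, List.toFinset_filter]
  unfold pvCntE
  apply congrArg
  apply Finset.filter_congr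
  intro x _
  simp

theorem pvRep_init (nodes : List Int) (edges : List (Int × Int))
    (hA : pvOkA (pvAV nodes edges)) :
    pvRep (pvAV nodes edges) (List.replicate 1000001 false) (∅ : Finset Int) := by
  refine ⟨List.length_replicate, ?_⟩
  intro x hx
  have hb := hA.1 x hx
  have hidx := pvIdx_eq x hb.1 hb.2
  unfold PySem.List.pyGet?
  rw [List.length_replicate, hidx.1]
  simp only [Option.bind_some]
  rw [List.getElem?_replicate]
  rw [if_pos hidx.2]
  simp

theorem pvStepA_skip (G : PySem.Dict Int (List Int)) (st : Int × Int × List Bool) (n : Int)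
    (h : ¬ PySem.List.pyGet? st.2.2 n = some false) : pvStepA G st n = st := by
  simp [pvStepA, h]

theorem pvStepA_go (G : PySem.Dict Int (List Int)) (st : Int × Int × List Bool) (n : Int)
    (v2 : List Bool) (b1 : Bool) (c1 : Int) (b2 : Bool) (c2 : Int)
    (h : PySem.List.pyGet? st.2.2 n = some false)
    (hrun : pvBfsLoop G [n] (PySem.List.pySetD st.2.2 n true) true 1 true 1 = (v2, b1, c1, b2, c2)) :
    pvStepA G st n =
      (st.1 + (if (if b1 && decide (c1 ≠ 0) then false else b1) then 1 else 0),
       st.2.1 + (if (if b2 && decide (c2 ≠ 0) then false else b2) then 1 else 0), v2) := by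
  simp only [pvStepA, if_pos h, hrun]

theorem pvStepB_skip (da : PySem.Dict Int Int × PySem.Dict Int (List Int))
    (st : Int × Int × PySem.Set Int) (n : Int)
    (h : PySem.Set.contains st.2.2 n = true) : pvStepB da st n = st := by
  unfold pvStepB
  rw [if_pos h]

theorem pvStepB_go (da : PySem.Dict Int Int × PySem.Dict Int (List Int))
    (st : Int × Int × PySem.Set Int) (n : Int)
    (h : ¬ PySem.Set.contains st.2.2 n) :
    pvStepB da st n =
      (let comp := pvDfsLoop da.2 [n] (PySem.Set.add PySem.Set.empty n)
       let even : Int := (comp.countP (fun x => decide (PySem.Int.mod (x + da.1.getD x 0) 2 = 0)) : Int)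
       ((if even = 1 then st.1 + 1 else st.1),
        (if (comp.length : Int) - even = 1 then st.2.1 + 1 else st.2.1),
        PySem.Set.update st.2.2 comp)) := by
  unfold pvStepB
  rw [if_neg h]

theorem pvOuterLoop (nodes : List Int) (edges : List (Int × Int))
    (hA : pvOkA (pvAV nodes edges)) :
    ∀ (ns : List Int), (∀ y ∈ ns, y ∈ pvAV nodes edges) →
    ∀ (a0 a1 : Int) (v : List Bool) (seen : PySem.Set Int) (S : Finset Int),
      pvRep (pvAV nodes edges) v S →
      seen.Nodup → seen.toFinset = S →
      (∀ x ∈ S, ∀ y, pvStep edges x y → y ∈ S) →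
      (ns.foldl (pvStepA (pvGraphA edges)) (a0, a1, v)).1 =
        (ns.foldl (pvStepB (pvDegAdj edges)) (a0, a1, seen)).1 ∧
      (ns.foldl (pvStepA (pvGraphA edges)) (a0, a1, v)).2.1 =
        (ns.foldl (pvStepB (pvDegAdj edges)) (a0, a1, seen)).2.1 := by
  intro ns
  induction ns with
  | nil => intro _ a0 a1 v seen S _ _ _ _; exact ⟨rfl, rfl⟩
  | cons n tl ih =>
    intro hns a0 a1 v seen S hrep hsnd hstf hScl
    have hnA : n ∈ pvAV nodes edges := hns n List.mem_cons_self
    have htl : ∀ y ∈ tl, y ∈ pvAV nodes edges := fun y hy => hns y (List.mem_cons_of_mem _ hy)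
    simp only [List.foldl_cons]
    by_cases hn : n ∈ S
    · -- both sides skip
      rw [pvStepA_skip _ _ _ (by
          rw [pvRep_read (pvAV nodes edges) hA v S hrep n hnA]; simpa using hn)]
      rw [pvStepB_skip _ _ _ (by
          show PySem.Set.contains seen n = true
          have : n ∈ seen := List.mem_toFinset.mp (by rw [hstf]; exact hn)
          simpa using this)]
      exact ih htl a0 a1 v seen S hrep hsnd hstf hScl
    · -- both sides process the component of n
      have hcond : PySem.List.pyGet? v n = some false :=
        (pvRep_read (pvAV nodes edges) hA v S hrep n hnA).mpr hn
      have hrep1 : pvRep (pvAV nodes edges) (PySem.List.pySetD v n true) (insert n S) :=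
        pvRep_write (pvAV nodes edges) hA v S hrep n hnA
      obtain ⟨v2, hrun, hrep2⟩ := pvBfs_main nodes edges hA S hScl n hnA hn
        (2 * (PySem.List.pySetD v n true).count false + 1) [n] (PySem.List.pySetD v n true)
        ∅ true 1 true 1
        (by simp)
        (by simp)
        (by intro y hy; simp at hy; rw [hy]; exact pvClass_start edges n)
        (by simp)
        (by simp)
        (by simp)
        (Or.inr (by simp))
        (by have he : S ∪ (∅ ∪ ([n] : List Int).toFinset) = insert n S := by
              ext z; simp [or_comm]
            rw [he]; exact hrep1)
        (by simp [pvCntE, pvEncE])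
        (by simp [pvCntO, pvEncE])
      rw [pvStepA_go (pvGraphA edges) (a0, a1, v) n v2 _ _ _ _ hcond hrun]
      -- B side
      have hcontB : ¬ PySem.Set.contains seen n = true := by
        intro hc
        exact hn (by rw [← hstf]; exact List.mem_toFinset.mpr (by simpa using hc))
      rw [pvStepB_go (pvDegAdj edges) (a0, a1, seen) n hcontB]
      simp only [pvDegAdj_snd]
      have haddn : PySem.Set.add PySem.Set.empty n = [n] := rfl
      rw [haddn]
      obtain ⟨hnodupC, htfC⟩ := pvDfs_main edges n
        (2 * (((pvGraphA edges).values.flatten.toFinset) \ ([n] : List Int).toFinset).card + 1)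
        [n] [n]
        (by simp)
        (by simp)
        (by simp)
        (by intro y hy; exact hy)
        (by intro y hy; simp at hy; rw [hy]; exact pvClass_start edges n)
        (by simp)
        (by intro x hx hnx; simp at hx; rw [hx] at hnx; simp at hnx)
      -- counts
      have hcntE : (pvDfsLoop (pvGraphA edges) [n] [n]).countP
          (fun x => decide (PySem.Int.mod (x + (pvDegAdj edges).1.getD x 0) 2 = 0)) =
          pvCntE edges (pvClass edges n) := by
        rw [pvCnt_list edges _ hnodupC, htfC]
      have hlenC : (pvDfsLoop (pvGraphA edges) [n] [n]).length = (pvClass edges n).card := by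
        rw [← List.toFinset_card_of_nodup hnodupC, htfC]
      have hcards := pvCnt_card edges (pvClass edges n)
      -- equal increments
      have ha0 : a0 + (if (if (pvEncE (pvCntE edges (pvClass edges n))).1 &&
              decide ((pvEncE (pvCntE edges (pvClass edges n))).2 ≠ 0) then false
            else (pvEncE (pvCntE edges (pvClass edges n))).1) then 1 else 0) =
          (if ((pvDfsLoop (pvGraphA edges) [n] [n]).countP
              (fun x => decide (PySem.Int.mod (x + (pvDegAdj edges).1.getD x 0) 2 = 0)) : Int) = 1
           then a0 + 1 else a0) := by
        rw [pvFinalFlag, hcntE]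
        by_cases hc1 : pvCntE edges (pvClass edges n) = 1
        · have h2 : ((pvCntE edges (pvClass edges n) : Int)) = 1 := by exact_mod_cast hc1
          simp [hc1, h2]
        · have h2 : ¬ ((pvCntE edges (pvClass edges n) : Int)) = 1 :=
            fun hcc => hc1 (by exact_mod_cast hcc)
          simp [hc1, h2]
      have ha1 : a1 + (if (if (pvEncE (pvCntO edges (pvClass edges n))).1 &&
              decide ((pvEncE (pvCntO edges (pvClass edges n))).2 ≠ 0) then false
            else (pvEncE (pvCntO edges (pvClass edges n))).1) then 1 else 0) =
          (if ((pvDfsLoop (pvGraphA edges) [n] [n]).length : Int) -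
              ((pvDfsLoop (pvGraphA edges) [n] [n]).countP
              (fun x => decide (PySem.Int.mod (x + (pvDegAdj edges).1.getD x 0) 2 = 0)) : Int) = 1
           then a1 + 1 else a1) := by
        rw [pvFinalFlag, hcntE, hlenC]
        have hiff : ((((pvClass edges n).card : Int) - (pvCntE edges (pvClass edges n) : Int)) = 1) ↔
            pvCntO edges (pvClass edges n) = 1 := by omega
        by_cases hc1 : pvCntO edges (pvClass edges n) = 1
        · have h2 := hiff.mpr hc1
          simp [hc1, h2]
        · have h2 : ¬ ((((pvClass edges n).card : Int) - (pvCntE edges (pvClass edges n) : Int)) = 1) :=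
            fun hcc => hc1 (hiff.mp hcc)
          simp [hc1, h2]
      rw [← ha0, ← ha1]
      -- recurse
      apply ih htl _ _ v2 (PySem.Set.update seen (pvDfsLoop (pvGraphA edges) [n] [n]))
        (S ∪ pvClass edges n) hrep2
      · exact PySem.Set.nodup_update _ _ hsnd
      · ext z
        rw [List.mem_toFinset]
        rw [PySem.Set.mem_update]
        rw [Finset.mem_union, ← hstf, List.mem_toFinset, ← htfC, List.mem_toFinset]
      · intro x hx y hstp
        rcases Finset.mem_union.mp hx with hx | hx
        · exact Finset.mem_union_left _ (hScl x hx y hstp)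
        · exact Finset.mem_union_right _ (pvClass_closed edges n x y hx hstp)

-- ===== VERDICT (by name: the statement is the Claim_ definition above) =====
theorem solution_spec : Claim_equal_solution := by
  unfold Claim_equal_solution
  intro nodes edges hdom hpre
  unfold Spec_solution
  have hA := pvOkA_of_pre nodes edges hpre
  have hns : ∀ y ∈ nodes, y ∈ pvAV nodes edges := by
    intro y hy
    unfold pvAV pvVals
    rw [List.mem_toFinset]
    exact List.mem_append_left _ hy
  obtain ⟨h1, h2⟩ := pvOuterLoop nodes edges hA nodes hns 0 0
    (List.replicate 1000001 false) PySem.Set.empty ∅ (pvRep_init nodes edges hA)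
    List.nodup_nil (by simp [PySem.Set.empty]) (by simp)
  show [(nodes.foldl (pvStepA (pvGraphA edges)) (0, 0, List.replicate 1000001 false)).1,
        (nodes.foldl (pvStepA (pvGraphA edges)) (0, 0, List.replicate 1000001 false)).2.1] =
       [(nodes.foldl (pvStepB (pvDegAdj edges)) (0, 0, PySem.Set.empty)).1,
        (nodes.foldl (pvStepB (pvDegAdj edges)) (0, 0, PySem.Set.empty)).2.1]
  rw [h1, h2]
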